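-- pv_equiv track=rewrite | github.com/0xRamadan/Algorithms-and-Data-Structures-training---IEEE-CS-ZSB | CS21-Science-Day-11/A. Doggo Recoloring.py | can_be_recolored
-- ===== SOURCE A (Python) =====
-- def can_be_recolored(colors, numberOfColors):
--     # prepocessing
--     # e.g: ord(j) = 106  >> length of freq_array = 106 - 96 = 10
--     frequency_array = [0 for i in range(ord(max(colors)) - 96)]
--     for color in colors:
--         frequency_array[ord(color)-97] += 1
--
--     flag = 0
--     for color in frequency_array:
--         if color > 1 or numberOfColors == 1:
--             flag += 1
--             break
--     return flag
-- ===== SOURCE B (Python) =====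
-- def can_be_recolored(colors, numberOfColors):
--     codes = sorted(ord(color) for color in colors)
--     if numberOfColors == 1:
--         return 1
--     for i in range(len(codes) - 1):
--         if codes[i] == codes[i + 1]:
--             return 1
--     return 0
-- ===== Notes on version B (the rewrite author's own statement) =====
-- stated objective: alternative
-- what changed: Replaces A's ord-indexed frequency array and scan-for-a-count>1 loop with sorting the ord codes and one scan for an equal adjacent pair (a repeated color exists iff the sorted codes have adjacent equals); no counting structure at all.
-- outside the precondition, e.g. on can_be_recolored([], 1): A raises ValueError, B returns 1; on can_be_recolored(['Z'], 2): A raises IndexError, B returns 0; on can_be_recolored(['Z', 'd', 'j'], 3): A returns 1, B returns 0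
import Mathlib
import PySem

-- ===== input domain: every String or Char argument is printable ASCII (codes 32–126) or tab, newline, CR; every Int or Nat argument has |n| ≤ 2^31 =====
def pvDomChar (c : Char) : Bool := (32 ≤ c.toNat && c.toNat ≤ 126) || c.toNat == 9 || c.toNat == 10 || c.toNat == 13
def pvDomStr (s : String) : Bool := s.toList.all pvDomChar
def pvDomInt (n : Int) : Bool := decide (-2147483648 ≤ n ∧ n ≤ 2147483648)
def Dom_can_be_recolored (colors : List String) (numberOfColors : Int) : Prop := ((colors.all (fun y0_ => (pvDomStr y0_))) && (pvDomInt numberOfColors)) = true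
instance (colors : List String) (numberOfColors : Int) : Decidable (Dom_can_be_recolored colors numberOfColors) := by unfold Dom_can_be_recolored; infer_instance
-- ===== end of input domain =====

-- B sorts the ord codes and scans once for an equal adjacent pair instead of A's ord-indexed
-- frequency array and count scan (no counting structure); equivalence is proved on Pre_ below.

-- ===== PORT A =====
-- ord(s): Python raises TypeError unless s is a single character (excluded by Pre_; the 0 default is never reached there)
def pvOrd (s : String) : Int :=
  match s.toList with
  | [c] => (c.toNat : Int)
  | _ => 0

-- frequency_array[i] += 1 ; an out-of-range i is Python's IndexError, excluded by Pre_
def pvIncAt (l : List Int) (i : Int) : List Int :=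
  PySem.List.pySetD l i (PySem.List.pyGetD l i 0 + 1)

-- the second loop: flag = 0; for color in freq: if color > 1 or k == 1: flag += 1; break
def pvFindFlag (freq : List Int) (k : Int) : Int :=
  match freq with
  | [] => 0
  | c :: rest => if c > 1 ∨ k = 1 then 1 else pvFindFlag rest k

def can_be_recolored (colors : List String) (numberOfColors : Int) : Int :=
  match PySem.List.max? colors (fun s => s) with
  | none => 0   -- Python: max([]) raises ValueError; excluded by Pre_
  | some m =>
    let freq0 := List.replicate (pvOrd m - 96).toNat (0 : Int)
    let freq := colors.foldl (fun fa color => pvIncAt fa (pvOrd color - 97)) freq0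
    pvFindFlag freq numberOfColors

-- ===== PORT B =====
-- the index loop 'for i in range(len(codes)-1): if codes[i] == codes[i+1]: return 1' over adjacent pairs
def pvAdjDup (s : List Int) : Bool :=
  match s with
  | a :: b :: t => a == b || pvAdjDup (b :: t)
  | _ => false

-- codes = sorted(ord(color) for color in colors)  (pvOrd is the shared port of the builtin ord)
def can_be_recolored_alt (colors : List String) (numberOfColors : Int) : Int :=
  let codes := PySem.List.sorted (colors.map pvOrd) (fun x => x) false
  if numberOfColors = 1 then 1
  else if pvAdjDup codes then 1 else 0

-- ===== PRECONDITION & SPEC =====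
-- Pre_ excludes inputs where A raises (empty list: ValueError from max; a string that is not a
-- single character: TypeError from ord; characters below 'a' whose negative index falls out of
-- range: IndexError) and, with them, the remaining below-'a' inputs where A returns an accidental
-- value produced by Python's negative-index wraparound into the frequency array.
def Pre_can_be_recolored (colors : List String) (numberOfColors : Int) : Prop :=
  colors ≠ [] ∧
    (colors.all (fun s => s.toList.length == 1 && s.toList.all (fun c => 97 ≤ c.toNat))) = true
instance (colors : List String) (numberOfColors : Int) : Decidable (Pre_can_be_recolored colors numberOfColors) := by unfold Pre_can_be_recolored; infer_instance

def pvWitness_can_be_recolored : List String × Int := (["a", "b", "b"], 2)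

def Spec_can_be_recolored (colors : List String) (numberOfColors : Int) (out : Int) : Prop := out = can_be_recolored_alt colors numberOfColors
instance (colors : List String) (numberOfColors : Int) (out : Int) : Decidable (Spec_can_be_recolored colors numberOfColors out) := by unfold Spec_can_be_recolored; infer_instance

-- ===== CLAIM (what is proved, stated in full; the proofs are below) =====
def Claim_equal_can_be_recolored : Prop := ∀ (colors : List String) (numberOfColors : Int), Dom_can_be_recolored colors numberOfColors → Pre_can_be_recolored colors numberOfColors → Spec_can_be_recolored colors numberOfColors (can_be_recolored colors numberOfColors)

-- ===== LEMMAS AND PROOFS =====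

-- single-character strings: pvOrd respects the string order and is injective
lemma pvOrd_le_of_le (s t : String) (cs ct : Char) (hs : s.toList = [cs]) (ht : t.toList = [ct])
    (h : s ≤ t) : pvOrd s ≤ pvOrd t := by
  by_contra hlt
  simp only [pvOrd, hs, ht, not_le] at hlt
  have hct : ct < cs := by
    by_contra hcc
    have : cs.toNat ≤ ct.toNat := Nat.le_of_not_lt (fun hc => hcc (Char.lt_def.mpr (by
      unfold Char.toNat at hc; exact_mod_cast hc)))
    omega
  have : t < s := by
    rw [String.lt_iff_toList_lt, hs, ht]
    exact List.cons_lt_cons_iff.mpr (Or.inl hct)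
  exact absurd this (not_lt.mpr h)

lemma pvOrd_inj (s t : String) (cs ct : Char) (hs : s.toList = [cs]) (ht : t.toList = [ct])
    (h : pvOrd s = pvOrd t) : s = t := by
  simp only [pvOrd, hs, ht] at h
  have hc : cs = ct := by
    apply Char.ext
    have : cs.toNat = ct.toNat := by exact_mod_cast h
    unfold Char.toNat at this
    exact UInt32.toNat_inj.mp this
  apply String.toList_inj.mp
  rw [hs, ht, hc]

-- the frequency-building fold keeps the length
lemma fold_inc_length (cs : List String) (acc : List Int) :
    (cs.foldl (fun fa color => pvIncAt fa (pvOrd color - 97)) acc).length = acc.length := by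
  induction cs generalizing acc with
  | nil => rfl
  | cons c t ih =>
    rw [List.foldl_cons, ih]
    simp [pvIncAt, PySem.List.length_pySetD]

-- each in-range cell of the fold result counts the colors hashing to it
lemma fold_inc_getD (cs : List String) (acc : List Int) (j : Nat)
    (hj : j < acc.length)
    (h : ∀ s ∈ cs, 0 ≤ pvOrd s - 97 ∧ pvOrd s - 97 < (acc.length : Int)) :
    (cs.foldl (fun fa color => pvIncAt fa (pvOrd color - 97)) acc).getD j 0
      = acc.getD j 0 + (cs.countP (fun s => decide (pvOrd s - 97 = (j : Int))) : Int) := by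
  induction cs generalizing acc with
  | nil => simp
  | cons c t ih =>
    obtain ⟨hc0, hclen⟩ := h c (List.mem_cons_self)
    have hstep : pvIncAt acc (pvOrd c - 97)
        = acc.set (pvOrd c - 97).toNat (acc.getD (pvOrd c - 97).toNat 0 + 1) := by
      rw [pvIncAt, PySem.List.pySetD_of_nonneg _ _ hc0,
        PySem.List.pyGetD_eq_getElem _ _ hc0 (by simpa using hclen),
        List.getD_eq_getElem _ _ (by omega)]
    have hlen' : (acc.set (pvOrd c - 97).toNat (acc.getD (pvOrd c - 97).toNat 0 + 1)).length = acc.length :=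
      List.length_set ..
    rw [List.foldl_cons, hstep, ih _ (by omega) (by
      intro s hs; have := h s (List.mem_cons_of_mem _ hs); omega)]
    rw [List.countP_cons]
    by_cases hij : pvOrd c - 97 = (j : Int)
    · have hjn : (pvOrd c - 97).toNat = j := by omega
      simp only [hij, decide_true, List.getD_eq_getElem?_getD, List.getElem?_set,
        Int.toNat_natCast, if_pos hj, List.getElem?_eq_getElem hj, Option.getD_some, if_true]
      push_cast
      omega
    · have hjn : (pvOrd c - 97).toNat ≠ j := by omega
      simp only [hij, decide_false, List.getD_eq_getElem?_getD, List.getElem?_set,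
        if_neg hjn]
      push_cast
      omega

-- the scan loop returns 1 iff k == 1 or some count exceeds 1 (on a nonempty array)
lemma pvFindFlag_eq (freq : List Int) (k : Int) (hne : freq ≠ []) :
    pvFindFlag freq k = if k = 1 ∨ ∃ x ∈ freq, x > 1 then 1 else 0 := by
  induction freq with
  | nil => exact absurd rfl hne
  | cons c t ih =>
    by_cases hk : k = 1
    · simp [pvFindFlag, hk]
    · by_cases hc : c > 1
      · simp [pvFindFlag, hc]
      · have hstep : pvFindFlag (c :: t) k = pvFindFlag t k := by
          simp [pvFindFlag, hc, hk]
        have hiff : (k = 1 ∨ ∃ x ∈ t, x > 1) ↔ (k = 1 ∨ ∃ x ∈ c :: t, x > 1) := by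
          constructor
          · rintro (h | ⟨x, hx, hx1⟩)
            · exact Or.inl h
            · exact Or.inr ⟨x, List.mem_cons_of_mem _ hx, hx1⟩
          · rintro (h | ⟨x, hx, hx1⟩)
            · exact Or.inl h
            · rcases List.mem_cons.mp hx with rfl | hx
              · omega
              · exact Or.inr ⟨x, hx, hx1⟩
        rcases t with _ | ⟨y, t2⟩
        · rw [hstep]
          show (0 : Int) = _
          rw [if_neg]
          rintro (h | ⟨x, hx, hx1⟩)
          · exact hk h
          · rcases List.mem_cons.mp hx with rfl | hx
            · exact hc hx1
            · exact absurd hx (List.not_mem_nil)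
        · rw [hstep, ih (List.cons_ne_nil y t2), if_congr hiff rfl rfl]

-- B's adjacent scan on a ≤-sorted list finds an equal pair iff the list has a duplicate
lemma pvAdjDup_eq_false_iff (s : List Int) (hp : s.Pairwise (· ≤ ·)) :
    pvAdjDup s = false ↔ s.Nodup := by
  induction s with
  | nil => simp [pvAdjDup]
  | cons a t ih =>
    rcases t with _ | ⟨b, t2⟩
    · simp [pvAdjDup]
    · have hpt : (b :: t2).Pairwise (· ≤ ·) := hp.of_cons
      have hab : a ≤ b := (List.pairwise_cons.mp hp).1 b (List.mem_cons_self)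
      have hble : ∀ x ∈ t2, b ≤ x := fun x hx => (List.pairwise_cons.mp hpt).1 x hx
      constructor
      · intro h
        simp only [pvAdjDup, Bool.or_eq_false_iff, beq_eq_false_iff_ne] at h
        obtain ⟨hne, hrest⟩ := h
        have hnd : (b :: t2).Nodup := (ih hpt).mp hrest
        refine List.nodup_cons.mpr ⟨?_, hnd⟩
        intro ha
        rcases List.mem_cons.mp ha with rfl | ha2
        · exact hne rfl
        · exact hne (le_antisymm hab (hble a ha2))
      · intro hnd
        obtain ⟨hna, hnd2⟩ := List.nodup_cons.mp hnd
        show (a == b || pvAdjDup (b :: t2)) = false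
        rw [(ih hpt).mpr hnd2, Bool.or_false, beq_eq_false_iff_ne]
        exact fun h => hna (h ▸ List.mem_cons_self)

-- A's frequency array holds a cell > 1 iff colors has a duplicate
lemma freq_dup_iff (colors : List String) (n : Nat)
    (hsingle : ∀ s ∈ colors, ∃ c, s.toList = [c] ∧ 97 ≤ c.toNat)
    (hrange : ∀ s ∈ colors, 0 ≤ pvOrd s - 97 ∧ pvOrd s - 97 < (n : Int)) :
    (∃ x ∈ colors.foldl (fun fa color => pvIncAt fa (pvOrd color - 97))
        (List.replicate n (0 : Int)), x > 1) ↔ ¬ colors.Nodup := by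
  set step := fun (fa : List Int) (color : String) => pvIncAt fa (pvOrd color - 97) with hstep
  have hlen : (colors.foldl step (List.replicate n (0 : Int))).length = n := by
    rw [fold_inc_length]; exact List.length_replicate
  have hcell : ∀ j : Nat, j < n →
      (colors.foldl step (List.replicate n (0 : Int))).getD j 0
        = (colors.countP (fun s => decide (pvOrd s - 97 = (j : Int))) : Int) := by
    intro j hj
    rw [fold_inc_getD colors _ j (by simpa using hj) (by simpa using hrange)]
    simp
  constructor
  · rintro ⟨x, hx, hx1⟩
    obtain ⟨j, hj, hxj⟩ := List.getElem_of_mem hx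
    have hj' : j < n := by omega
    have hcount : 1 < (colors.countP (fun s => decide (pvOrd s - 97 = (j : Int))) : Int) := by
      rw [← hcell j hj', List.getD_eq_getElem _ _ (by omega), hxj]; exact hx1
    have hpos : 0 < colors.countP (fun s => decide (pvOrd s - 97 = (j : Int))) := by omega
    obtain ⟨s, hs, hps⟩ := List.countP_pos_iff.mp hpos
    have hcnt : colors.countP (fun s => decide (pvOrd s - 97 = (j : Int))) ≤ colors.count s := by
      rw [List.count]
      apply List.countP_mono_left
      intro t ht hpt
      obtain ⟨ct, hct, _⟩ := hsingle t ht
      obtain ⟨cs, hcs, _⟩ := hsingle s hs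
      have : pvOrd t = pvOrd s := by
        have h1 := of_decide_eq_true hpt
        have h2 := of_decide_eq_true hps
        omega
      simpa using pvOrd_inj t s ct cs hct hcs this
    intro hnd
    have := List.nodup_iff_count_le_one.mp hnd s
    omega
  · intro hnd
    obtain ⟨a, ha⟩ := not_forall.mp (fun h => hnd (List.nodup_iff_count_le_one.mpr h))
    have ha2 : 2 ≤ colors.count a := by omega
    have hamem : a ∈ colors := List.count_pos_iff.mp (by omega)
    obtain ⟨h0, h1⟩ := hrange a hamem
    set j := (pvOrd a - 97).toNat with hjdef
    have hj : j < n := by omega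
    have hcnt : colors.count a ≤ colors.countP (fun s => decide (pvOrd s - 97 = (j : Int))) := by
      rw [List.count]
      apply List.countP_mono_left
      intro t ht hpt
      have : t = a := by simpa using hpt
      subst this
      simp only [decide_eq_true_eq]
      omega
    refine ⟨(colors.foldl step (List.replicate n (0 : Int))).getD j 0, ?_, ?_⟩
    · rw [List.getD_eq_getElem _ _ (by omega)]
      exact List.getElem_mem _
    · rw [hcell j hj]; omega

-- ===== VERDICT (by name: the statement is the Claim_ definition above) =====
theorem can_be_recolored_spec : Claim_equal_can_be_recolored := by
  intro colors k _hdom hpre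
  obtain ⟨hne, hall⟩ := hpre
  have hsingle' : ∀ s ∈ colors, s.toList.length = 1 ∧ ∀ c ∈ s.toList, 97 ≤ c.toNat := by
    intro s hs
    simpa [List.all_eq_true] using List.all_eq_true.mp hall s hs
  have hsingle : ∀ s ∈ colors, ∃ c, s.toList = [c] ∧ 97 ≤ c.toNat := by
    intro s hs
    obtain ⟨hlen, hch⟩ := hsingle' s hs
    obtain ⟨c, hc⟩ := List.length_eq_one_iff.mp hlen
    exact ⟨c, hc, hch c (by rw [hc]; exact List.mem_singleton_self c)⟩
  unfold Spec_can_be_recolored can_be_recolored can_be_recolored_alt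
  obtain ⟨m, hm⟩ := Option.ne_none_iff_exists'.mp
    (fun h => hne ((PySem.List.max?_eq_none_iff colors (fun s => s)).mp h))
  rw [hm]
  show pvFindFlag (colors.foldl (fun fa color => pvIncAt fa (pvOrd color - 97))
      (List.replicate (pvOrd m - 96).toNat (0 : Int))) k
    = if k = 1 then 1
      else if pvAdjDup (PySem.List.sorted (colors.map pvOrd) (fun x => x) false) then 1 else 0
  obtain ⟨cm, hcm, hcm97⟩ := hsingle m (PySem.List.max?_mem hm)
  have hordm : pvOrd m = (cm.toNat : Int) := by simp [pvOrd, hcm]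
  have hrange : ∀ s ∈ colors, 0 ≤ pvOrd s - 97 ∧ pvOrd s - 97 < ((pvOrd m - 96).toNat : Int) := by
    intro s hs
    obtain ⟨cs, hcs, hcs97⟩ := hsingle s hs
    have h1 : pvOrd s = (cs.toNat : Int) := by simp [pvOrd, hcs]
    have h2 : pvOrd s ≤ pvOrd m :=
      pvOrd_le_of_le s m cs cm hcs hcm (PySem.List.max?_isMax hm s hs)
    omega
  have hn1 : 1 ≤ (pvOrd m - 96).toNat := by omega
  have hfreqne : colors.foldl (fun fa color => pvIncAt fa (pvOrd color - 97))
      (List.replicate (pvOrd m - 96).toNat (0 : Int)) ≠ [] := by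
    intro h
    have := fold_inc_length colors (List.replicate (pvOrd m - 96).toNat (0 : Int))
    rw [h] at this
    simp at this
    omega
  have hdup := freq_dup_iff colors ((pvOrd m - 96).toNat) hsingle hrange
  have hsortp : (PySem.List.sorted (colors.map pvOrd) (fun x => x) false).Pairwise (· ≤ ·) :=
    PySem.List.sorted_pairwise (colors.map pvOrd) (fun x => x)
  have hperm : (PySem.List.sorted (colors.map pvOrd) (fun x => x) false).Perm (colors.map pvOrd) :=
    PySem.List.sorted_perm (colors.map pvOrd) (fun x => x) false
  have hmapnd : (colors.map pvOrd).Nodup ↔ colors.Nodup := by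
    constructor
    · exact List.Nodup.of_map pvOrd
    · intro hnd
      refine hnd.map_on ?_
      intro s hs t ht heq
      obtain ⟨cs, hcs, _⟩ := hsingle s hs
      obtain ⟨ct, hct, _⟩ := hsingle t ht
      exact pvOrd_inj s t cs ct hcs hct heq
  have hadj : pvAdjDup (PySem.List.sorted (colors.map pvOrd) (fun x => x) false) = true
      ↔ ¬ colors.Nodup := by
    rw [← hmapnd, ← hperm.nodup_iff, ← pvAdjDup_eq_false_iff _ hsortp]
    constructor
    · intro h hf; rw [h] at hf; simp at hf
    · intro h
      cases hb : pvAdjDup (PySem.List.sorted (colors.map pvOrd) (fun x => x) false) with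
      | false => exact absurd hb h
      | true => rfl
  rw [pvFindFlag_eq _ _ hfreqne]
  by_cases hk : k = 1
  · rw [if_pos (Or.inl hk), if_pos hk]
  · rw [if_neg hk]
    by_cases hd : colors.Nodup
    · have h1 : ¬ (k = 1 ∨ ∃ x ∈ colors.foldl (fun fa color => pvIncAt fa (pvOrd color - 97))
          (List.replicate (pvOrd m - 96).toNat (0 : Int)), x > 1) := by
        rintro (h | h)
        · exact hk h
        · exact (hdup.mp h) hd
      have h2 : ¬ pvAdjDup (PySem.List.sorted (colors.map pvOrd) (fun x => x) false) = true := by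
        intro h; exact (hadj.mp h) hd
      rw [if_neg h1, if_neg h2]
    · rw [if_pos (Or.inr (hdup.mpr hd)), if_pos (hadj.mpr hd)]
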